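-- pv_equiv track=rewrite | github.com/pelavarre/pybashish | bin/argdoc.py | str_splitword
-- ===== SOURCE A (Python) =====
-- def str_splitword(chars, count=1):
--     """Return the leading whitespace and words, split from the remaining chars"""
--
--     tail = chars
--     if count >= 1:
--         counted_words = chars.split()[:count]
--         for word in counted_words:
--             tail = tail[tail.index(word) :][len(word) :]
--
--     if not tail:
--
--         return (chars, "")
--
--     head = chars[: -len(tail)]
--
--     return (head, tail)
-- ===== SOURCE B (Python) =====
-- def str_splitword(chars, count=1):
--     """Return the leading whitespace and words, split from the remaining chars"""
--
--     # One forward scan: advance a cut pointer past `count` words (each word =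
--     # a whitespace run skipped, then a non-whitespace run consumed), instead of
--     # re-splitting and substring-searching with .index().
--     cut = 0
--     rest = chars
--     n = count
--     while n > 0:
--         r1 = rest.lstrip()
--         if not r1:
--             break
--         j = 0
--         while j < len(r1) and not r1[j].isspace():
--             j += 1
--         r2 = r1[j:]
--         cut += len(rest) - len(r2)
--         rest = r2
--         n -= 1
--
--     tail = chars[cut:]
--     if not tail:
--         return (chars, "")
--     return (chars[:cut], tail)
-- ===== Notes on version B (the rewrite author's own statement) =====
-- stated objective: alternative
-- what changed: B replaces A's split()-then-repeated-substring-.index()/double-slice loop with a single forward scan that advances a cut pointer past count words (skip a whitespace run, consume a non-whitespace run) and slices chars once at the cut.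
import Mathlib
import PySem

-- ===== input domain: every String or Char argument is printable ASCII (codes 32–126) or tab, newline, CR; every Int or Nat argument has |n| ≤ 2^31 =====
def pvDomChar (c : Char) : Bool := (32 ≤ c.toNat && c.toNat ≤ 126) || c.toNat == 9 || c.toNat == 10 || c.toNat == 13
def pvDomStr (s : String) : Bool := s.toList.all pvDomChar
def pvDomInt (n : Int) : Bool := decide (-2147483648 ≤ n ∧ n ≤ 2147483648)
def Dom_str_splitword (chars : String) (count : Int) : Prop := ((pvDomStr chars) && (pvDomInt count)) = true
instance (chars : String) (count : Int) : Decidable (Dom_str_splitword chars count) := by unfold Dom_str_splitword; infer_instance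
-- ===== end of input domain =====

-- B replaces A's split()+repeated-substring-.index() loop by one forward scan that
-- advances a cut pointer past `count` words (objective: alternative decomposition).

-- ===== PORT A =====
-- one loop body: tail = tail[tail.index(word):][len(word):]
def pvAStep (t w : List Char) : List Char :=
  PySem.List.slice (PySem.List.slice t (some (PySem.Chars.find t w)) none)
    (some (PySem.Chars.len w)) none

def str_splitword (chars : String) (count : Int) : String × String :=
  let cs := chars.toList
  let tail :=
    if 1 ≤ count then
      (PySem.List.slice (PySem.Chars.split₀ cs) none (some count)).foldl pvAStep cs
    else cs
  if tail = [] then (chars, "")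
  else (String.ofList (PySem.List.slice cs none (some (-(tail.length : Int)))), String.ofList tail)

-- ===== PORT B =====
-- the head of a dropWhile result falsifies the predicate (cited by pvAltGo's decreasing_by)
theorem pv_head_false {p : Char → Bool} {l : List Char} {c : Char} {t : List Char}
    (h : l.dropWhile p = c :: t) : p c = false := by
  have h2 := List.head_dropWhile_not p (l := l) (by simp [h])
  simpa [h] using h2

-- B consumes at least one character per word (cited by the decreasing_by below)
theorem pv_r2_lt {cs : List Char} {c : Char} {t : List Char}
    (h : cs.dropWhile PySem.Chars.isspace = c :: t) :
    ((c :: t).dropWhile (fun x => !PySem.Chars.isspace x)).length < cs.length := by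
  have hc : PySem.Chars.isspace c = false := pv_head_false h
  have h1 : (c :: t) <:+ cs := h ▸ List.dropWhile_suffix _
  have h2 : ((c :: t).dropWhile (fun x => !PySem.Chars.isspace x)).length ≤ t.length := by
    simp only [List.dropWhile, hc, Bool.not_false]
    exact (List.dropWhile_sublist _).length_le
  have h3 : (c :: t).length ≤ cs.length := h1.length_le
  simp at h3
  omega

-- the `while n > 0` scan of Source B: rest.lstrip() is dropWhile isspace, the inner
-- index loop and r1[j:] are dropWhile (not isspace); cut accumulates consumed chars
def pvAltGo (cs : List Char) (count : Int) (cut : Nat) : Nat :=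
  if count ≤ 0 then cut
  else
    match h : cs.dropWhile PySem.Chars.isspace with
    | [] => cut
    | c :: t =>
      let r2 := (c :: t).dropWhile (fun x => !PySem.Chars.isspace x)
      pvAltGo r2 (count - 1) (cut + (cs.length - r2.length))
termination_by cs.length
decreasing_by exact pv_r2_lt h

def str_splitword_alt (chars : String) (count : Int) : String × String :=
  let cs := chars.toList
  let cut := pvAltGo cs count 0
  let tail := cs.drop cut
  if tail = [] then (chars, "")
  else (String.ofList (cs.take cut), String.ofList tail)

-- ===== PRECONDITION & SPEC =====
def Spec_str_splitword (chars : String) (count : Int) (out : String × String) : Prop := out = str_splitword_alt chars count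
instance (chars : String) (count : Int) (out : String × String) : Decidable (Spec_str_splitword chars count out) := by unfold Spec_str_splitword; infer_instance

-- ===== CLAIM (what is proved, stated in full; the proofs are below) =====
def Claim_equal_str_splitword : Prop := ∀ (chars : String) (count : Int), Dom_str_splitword chars count → Spec_str_splitword chars count (str_splitword chars count)

-- ===== LEMMAS AND PROOFS =====


-- unfolding equations for pvAltGo (the match inside makes `rw [pvAltGo]` awkward)
theorem pvAltGo_nonpos {cs : List Char} {count : Int} (cut : Nat) (hc0 : count ≤ 0) :
    pvAltGo cs count cut = cut := by
  rw [pvAltGo]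
  simp [hc0]

theorem pvAltGo_pos_nil {cs : List Char} {count : Int} (cut : Nat) (hc0 : ¬ count ≤ 0)
    (h : cs.dropWhile PySem.Chars.isspace = []) : pvAltGo cs count cut = cut := by
  rw [pvAltGo]
  simp only [hc0, if_false]
  split
  · rfl
  · rename_i c t heq
    rw [h] at heq
    exact absurd heq (by simp)

theorem pvAltGo_pos_cons {cs : List Char} {count : Int} (cut : Nat) {c : Char} {t : List Char}
    (hc0 : ¬ count ≤ 0) (h : cs.dropWhile PySem.Chars.isspace = c :: t) :
    pvAltGo cs count cut
      = pvAltGo ((c :: t).dropWhile (fun x => !PySem.Chars.isspace x)) (count - 1)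
          (cut + (cs.length - ((c :: t).dropWhile (fun x => !PySem.Chars.isspace x)).length)) := by
  rw [pvAltGo]
  simp only [hc0, if_false]
  split
  · rename_i heq
    rw [h] at heq
    exact absurd heq (by simp)
  · rename_i c' t' heq
    rw [h] at heq
    cases heq
    rfl

-- split₀.go pulls its accumulator out front
theorem pv_go_acc (cs cur : List Char) (acc : List (List Char)) :
    PySem.Chars.split₀.go cs cur acc = acc.reverse ++ PySem.Chars.split₀.go cs cur [] := by
  induction cs generalizing cur acc with
  | nil => by_cases hc : cur.isEmpty <;> simp [PySem.Chars.split₀.go, hc]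
  | cons a rest ih =>
    by_cases ha : PySem.Chars.isspace a
    · by_cases hc : cur.isEmpty <;>
        simp [PySem.Chars.split₀.go, ha, hc, ih [] acc, ih [] (cur.reverse :: acc),
          ih [] [cur.reverse]]
    · simp [PySem.Chars.split₀.go, ha, ih (a :: cur) acc]

-- leading whitespace is skipped with the accumulator untouched
theorem pv_go_skip (cs : List Char) (acc : List (List Char)) :
    PySem.Chars.split₀.go cs [] acc
      = PySem.Chars.split₀.go (cs.dropWhile PySem.Chars.isspace) [] acc := by
  induction cs with
  | nil => rfl
  | cons a rest ih =>
    by_cases ha : PySem.Chars.isspace a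
    · simpa [PySem.Chars.split₀.go, ha, List.dropWhile] using ih
    · simp [List.dropWhile, ha]

-- a non-space run is consumed into the current chunk
theorem pv_go_chunk (cs cur : List Char) (acc : List (List Char)) :
    PySem.Chars.split₀.go cs cur acc
      = PySem.Chars.split₀.go (cs.dropWhile (fun x => !PySem.Chars.isspace x))
          ((cs.takeWhile (fun x => !PySem.Chars.isspace x)).reverse ++ cur) acc := by
  induction cs generalizing cur with
  | nil => rfl
  | cons a rest ih =>
    by_cases ha : PySem.Chars.isspace a
    · simp [List.dropWhile, List.takeWhile, ha]
    · simpa [PySem.Chars.split₀.go, List.dropWhile, List.takeWhile, ha] using ih (a :: cur)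

theorem pv_split_nil {cs : List Char} (h : cs.dropWhile PySem.Chars.isspace = []) :
    PySem.Chars.split₀ cs = [] := by
  unfold PySem.Chars.split₀
  rw [pv_go_skip, h]
  rfl

theorem pv_split_cons {cs : List Char} {c : Char} {t : List Char}
    (h : cs.dropWhile PySem.Chars.isspace = c :: t) :
    PySem.Chars.split₀ cs
      = (c :: t).takeWhile (fun x => !PySem.Chars.isspace x)
          :: PySem.Chars.split₀ ((c :: t).dropWhile (fun x => !PySem.Chars.isspace x)) := by
  have hc : PySem.Chars.isspace c = false := pv_head_false h
  have hw : (c :: t).takeWhile (fun x => !PySem.Chars.isspace x)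
      = c :: t.takeWhile (fun x => !PySem.Chars.isspace x) := by
    simp [List.takeWhile, hc]
  unfold PySem.Chars.split₀
  rw [pv_go_skip, h, pv_go_chunk]
  cases hr : (c :: t).dropWhile (fun x => !PySem.Chars.isspace x) with
  | nil => simp [PySem.Chars.split₀.go, hw]
  | cons d t2 =>
    have hd : PySem.Chars.isspace d = true := by
      have := pv_head_false hr
      simpa using this
    rw [hw]
    simp [PySem.Chars.split₀.go, hd]
    conv_lhs => rw [pv_go_acc]
    simp

-- .index finds the first word exactly after the leading whitespace run
theorem pv_find {cs : List Char} {c : Char} {t : List Char}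
    (h : cs.dropWhile PySem.Chars.isspace = c :: t) :
    PySem.Chars.find cs ((c :: t).takeWhile (fun x => !PySem.Chars.isspace x))
      = ((cs.takeWhile PySem.Chars.isspace).length : Int) := by
  have hc : PySem.Chars.isspace c = false := pv_head_false h
  set q : Char → Bool := fun x => !PySem.Chars.isspace x with hq
  set w := (c :: t).takeWhile q with hwdef
  set ws := cs.takeWhile PySem.Chars.isspace with hwsdef
  have hw : w = c :: t.takeWhile q := by simp [hwdef, List.takeWhile, hq, hc]
  have hsplit : ws ++ (c :: t) = cs := by rw [hwsdef, ← h, List.takeWhile_append_dropWhile]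
  have hpre : w <+: (c :: t) := List.takeWhile_prefix q
  have hinf : w <:+: cs := by
    obtain ⟨r, hr⟩ := hpre
    exact ⟨ws, r, by rw [List.append_assoc, hr, hsplit]⟩
  have hnn : 0 ≤ PySem.Chars.find cs w := (PySem.Chars.find_nonneg_iff cs w).mpr hinf
  obtain ⟨hat, hmin⟩ := PySem.Chars.find_spec hnn
  set k := (PySem.Chars.find cs w).toNat with hk
  have hdropws : cs.drop ws.length = c :: t := by
    have h2 := List.drop_left (l₁ := ws) (l₂ := c :: t)
    rwa [hsplit] at h2
  have hupper : k ≤ ws.length := by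
    by_contra hlt
    exact hmin ws.length (by omega) (hdropws ▸ hpre)
  have hlower : ws.length ≤ k := by
    by_contra hlt'
    have hlt : k < ws.length := by omega
    obtain ⟨r, hr⟩ := hat
    have hdecomp : List.drop k cs = List.drop k ws ++ (c :: t) := by
      rw [← hsplit, List.drop_append_of_le_length (by omega)]
    cases he : List.drop k ws with
    | nil =>
      have := congrArg List.length he
      simp [List.length_drop] at this
      omega
    | cons e es =>
      have hmem : e ∈ ws := List.mem_of_mem_drop (he ▸ List.mem_cons_self)
      have hes : PySem.Chars.isspace e = true := List.mem_takeWhile_imp (hwsdef ▸ hmem)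
      have h2 : w ++ r = e :: (es ++ (c :: t)) := by rw [hr, hdecomp, he]; simp
      rw [hw] at h2
      simp only [List.cons_append, List.cons.injEq] at h2
      rw [← h2.1, hc] at hes
      exact Bool.false_ne_true hes
  have : k = ws.length := by omega
  omega

-- one iteration of A's loop consumes the leading whitespace and the first word
theorem pv_step {cs : List Char} {c : Char} {t : List Char}
    (h : cs.dropWhile PySem.Chars.isspace = c :: t) :
    pvAStep cs ((c :: t).takeWhile (fun x => !PySem.Chars.isspace x))
      = (c :: t).dropWhile (fun x => !PySem.Chars.isspace x) := by
  set q : Char → Bool := fun x => !PySem.Chars.isspace x with hq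
  set w := (c :: t).takeWhile q with hwdef
  have hsplit : cs.takeWhile PySem.Chars.isspace ++ (c :: t) = cs := by
    rw [← h, List.takeWhile_append_dropWhile]
  have hdropws : cs.drop (cs.takeWhile PySem.Chars.isspace).length = c :: t := by
    have h2 := List.drop_left (l₁ := cs.takeWhile PySem.Chars.isspace) (l₂ := c :: t)
    rwa [hsplit] at h2
  unfold pvAStep
  rw [pv_find h, PySem.List.slice_from _ (Int.natCast_nonneg _), Int.toNat_natCast, hdropws,
    PySem.Chars.len_eq, PySem.List.slice_from _ (Int.natCast_nonneg _), Int.toNat_natCast]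
  conv_lhs => rw [show (c :: t) = w ++ (c :: t).dropWhile q from (List.takeWhile_append_dropWhile).symm]
  exact List.drop_left

-- B's scan pulls its cut accumulator out front
theorem pv_altGo_acc (cs : List Char) (count : Int) (cut : Nat) :
    pvAltGo cs count cut = cut + pvAltGo cs count 0 := by
  by_cases hc0 : count ≤ 0
  · rw [pvAltGo_nonpos cut hc0, pvAltGo_nonpos 0 hc0]
    omega
  · cases h : cs.dropWhile PySem.Chars.isspace with
    | nil =>
      rw [pvAltGo_pos_nil cut hc0 h, pvAltGo_pos_nil 0 hc0 h]
      omega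
    | cons c t =>
      rw [pvAltGo_pos_cons cut hc0 h, pvAltGo_pos_cons 0 hc0 h,
        pv_altGo_acc _ (count - 1) (cut + _), pv_altGo_acc _ (count - 1) (0 + _)]
      omega
termination_by cs.length
decreasing_by all_goals exact pv_r2_lt h

-- the cut never runs past the end of the string
theorem pv_altGo_le (cs : List Char) (count : Int) :
    pvAltGo cs count 0 ≤ cs.length := by
  by_cases hc0 : count ≤ 0
  · rw [pvAltGo_nonpos 0 hc0]
    omega
  · cases h : cs.dropWhile PySem.Chars.isspace with
    | nil =>
      rw [pvAltGo_pos_nil 0 hc0 h]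
      omega
    | cons c t =>
      have hlt := pv_r2_lt h
      rw [pvAltGo_pos_cons 0 hc0 h, pv_altGo_acc]
      have := pv_altGo_le ((c :: t).dropWhile (fun x => !PySem.Chars.isspace x)) (count - 1)
      omega
termination_by cs.length
decreasing_by exact pv_r2_lt h

-- MAIN: A's word loop leaves exactly the suffix after B's cut
theorem pv_main (cs : List Char) (count : Int) :
    ((PySem.Chars.split₀ cs).take count.toNat).foldl pvAStep cs
      = cs.drop (pvAltGo cs count 0) := by
  by_cases hc0 : count ≤ 0
  · rw [pvAltGo_nonpos 0 hc0]
    simp [Int.toNat_of_nonpos hc0]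
  · cases h : cs.dropWhile PySem.Chars.isspace with
    | nil =>
      rw [pvAltGo_pos_nil 0 hc0 h]
      simp [pv_split_nil h]
    | cons c t =>
      have hlt := pv_r2_lt h
      have hR : pvAltGo cs count 0
          = (cs.length - ((c :: t).dropWhile (fun x => !PySem.Chars.isspace x)).length)
              + pvAltGo ((c :: t).dropWhile (fun x => !PySem.Chars.isspace x)) (count - 1) 0 := by
        rw [pvAltGo_pos_cons 0 hc0 h, pv_altGo_acc]
        omega
      have hsuffix : (c :: t).dropWhile (fun x => !PySem.Chars.isspace x) <:+ cs :=
        ((List.dropWhile_suffix _).trans (h ▸ List.dropWhile_suffix _))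
      have hdrop : cs.drop (cs.length
          - ((c :: t).dropWhile (fun x => !PySem.Chars.isspace x)).length)
          = (c :: t).dropWhile (fun x => !PySem.Chars.isspace x) :=
        (List.suffix_iff_eq_drop.mp hsuffix).symm
      have hcount : count.toNat = (count - 1).toNat + 1 := by omega
      rw [pv_split_cons h, hcount, List.take_succ_cons, List.foldl_cons, pv_step h,
        pv_main ((c :: t).dropWhile (fun x => !PySem.Chars.isspace x)) (count - 1),
        hR, ← List.drop_drop, hdrop]
termination_by cs.length
decreasing_by exact pv_r2_lt h

-- ===== VERDICT (by name: the statement is the Claim_ definition above) =====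
theorem str_splitword_spec : Claim_equal_str_splitword := by
  intro chars count _
  unfold Spec_str_splitword str_splitword str_splitword_alt
  simp only []
  set cs := chars.toList with hcs
  have htail : (if 1 ≤ count then
        (PySem.List.slice (PySem.Chars.split₀ cs) none (some count)).foldl pvAStep cs
      else cs) = cs.drop (pvAltGo cs count 0) := by
    by_cases h1 : 1 ≤ count
    · rw [if_pos h1, PySem.List.slice_to _ (by omega : (0:Int) ≤ count)]
      exact pv_main cs count
    · rw [if_neg h1, pvAltGo_nonpos 0 (by omega)]
      simp
  rw [htail]
  by_cases hnil : cs.drop (pvAltGo cs count 0) = []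
  · simp [hnil]
  · rw [if_neg hnil, if_neg hnil]
    have hpos : 0 < (cs.drop (pvAltGo cs count 0)).length := List.length_pos_of_ne_nil hnil
    have hle : pvAltGo cs count 0 ≤ cs.length := pv_altGo_le cs count
    rw [PySem.List.slice_to_neg_natCast cs _ hpos]
    have : cs.length - (cs.drop (pvAltGo cs count 0)).length = pvAltGo cs count 0 := by
      rw [List.length_drop]
      omega
    rw [this]
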